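-- pv_equiv track=rewrite | github.com/sumanthakella123/anton-rx | anton-rx-backend/anton_rx/stage_pagemap.py | group_drugs_by_pages
-- ===== SOURCE A (Python) =====
-- def group_drugs_by_pages(
--     drug_page_map: dict[str, list[int]]
-- ) -> dict[str, list[str]]:
--     """
--     Group drugs that share the exact same set of pages.
--
--     Returns {page_fingerprint: [list of drug brand names]}.
--
--     Example::
--
--         Avastin  → [4,5,6,7] → fingerprint "4-5-6-7"
--         Mvasi    → [4,5,6,7] → fingerprint "4-5-6-7"  ← same group
--         Botox    → [8,9,10]  → fingerprint "8-9-10"   ← separate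
--     """
--     groups: dict[str, list[str]] = {}
--     for drug_name, page_list in drug_page_map.items():
--         fingerprint = "-".join(str(p) for p in sorted(page_list))
--         groups.setdefault(fingerprint, []).append(drug_name)
--     return groups
-- ===== SOURCE B (Python) =====
-- def group_drugs_by_pages(
--     drug_page_map: dict[str, list[int]]
-- ) -> dict[str, list[str]]:
--     """Two-pass variant: fingerprint every entry once, dedupe the fingerprints
--     in first-appearance order, then collect each group by a scan per key."""
--     pairs = [
--         ("-".join(str(p) for p in sorted(page_list)), drug_name)
--         for drug_name, page_list in drug_page_map.items()
--     ]
--     keys = list(dict.fromkeys(fp for fp, _ in pairs))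
--     return {k: [name for fp, name in pairs if fp == k] for k in keys}
-- ===== Notes on version B (the rewrite author's own statement) =====
-- stated objective: alternative
-- what changed: Replaces the one-pass setdefault-append grouping dict with a two-pass decomposition: precompute a (fingerprint, name) pair list, dedupe the fingerprints in first-appearance order, then build each group by filtering the pair list per distinct key.
import Mathlib
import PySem

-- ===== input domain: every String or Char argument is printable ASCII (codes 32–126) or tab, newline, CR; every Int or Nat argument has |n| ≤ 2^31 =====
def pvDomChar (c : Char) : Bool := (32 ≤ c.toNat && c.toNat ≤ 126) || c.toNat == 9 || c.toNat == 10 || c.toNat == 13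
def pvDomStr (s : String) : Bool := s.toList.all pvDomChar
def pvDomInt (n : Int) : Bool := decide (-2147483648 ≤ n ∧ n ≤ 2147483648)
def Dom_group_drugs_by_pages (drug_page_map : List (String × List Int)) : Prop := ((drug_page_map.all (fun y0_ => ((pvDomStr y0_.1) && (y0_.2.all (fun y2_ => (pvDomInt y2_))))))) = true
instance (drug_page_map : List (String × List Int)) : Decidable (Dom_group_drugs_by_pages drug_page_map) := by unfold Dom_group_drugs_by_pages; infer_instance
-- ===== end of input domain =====

-- B replaces A's one-pass setdefault-append grouping dict with a two-pass decomposition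
-- (pair list, ordered key dedup, one filter scan per distinct key); objective: alternative, same result.

-- ===== PORT A =====
def group_drugs_by_pages (drug_page_map : List (String × List Int)) : List (String × List String) :=
  (drug_page_map.foldl
    (fun (groups : PySem.Dict String (List String)) x =>
      let fingerprint := PySem.Str.join "-" ((PySem.List.sorted x.2 (fun p => p) false).map PySem.Int.toStr)
      groups.modify fingerprint [] (fun names => names ++ [x.1]))
    PySem.Dict.empty).items

-- ===== PORT B =====
def group_drugs_by_pages_alt (drug_page_map : List (String × List Int)) : List (String × List String) :=
  let pairs := drug_page_map.map
    (fun x => (PySem.Str.join "-" ((PySem.List.sorted x.2 (fun p => p) false).map PySem.Int.toStr), x.1))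
  let keys := PySem.List.dedup (pairs.map Prod.fst)
  keys.map (fun k => (k, ((pairs.filter (fun p => p.1 == k)).map Prod.snd)))

-- ===== PRECONDITION & SPEC =====
def Spec_group_drugs_by_pages (drug_page_map : List (String × List Int)) (out : List (String × List String)) : Prop := out = group_drugs_by_pages_alt drug_page_map
instance (drug_page_map : List (String × List Int)) (out : List (String × List String)) : Decidable (Spec_group_drugs_by_pages drug_page_map out) := by unfold Spec_group_drugs_by_pages; infer_instance

-- ===== CLAIM (what is proved, stated in full; the proofs are below) =====
def Claim_equal_group_drugs_by_pages : Prop := ∀ (drug_page_map : List (String × List Int)), Dom_group_drugs_by_pages drug_page_map → Spec_group_drugs_by_pages drug_page_map (group_drugs_by_pages drug_page_map)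

-- ===== LEMMAS AND PROOFS =====

-- A dict with Nodup keys is exactly its key list paired with its lookups.
theorem pv_items_eq_keys_map {κ ν : Type} [BEq κ] [LawfulBEq κ]
    (d : PySem.Dict κ ν) (h : d.keys.Nodup) (d0 : ν) :
    d.items = d.keys.map (fun k => (k, d.getD k d0)) := by
  show d.items = (d.items.map Prod.fst).map (fun k => (k, d.getD k d0))
  rw [List.map_map]
  refine Eq.symm ?_
  conv_rhs => rw [← List.map_id d.items]
  refine List.map_congr_left ?_
  intro p hp
  have := PySem.Dict.getD_of_mem_items d (k := p.1) (v := p.2) (by simpa using hp) h d0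
  simp [Function.comp, this]

theorem group_drugs_by_pages_eq_alt (m : List (String × List Int)) :
    group_drugs_by_pages m = group_drugs_by_pages_alt m := by
  unfold group_drugs_by_pages group_drugs_by_pages_alt
  set key : (String × List Int) → String :=
    fun x => PySem.Str.join "-" ((PySem.List.sorted x.2 (fun p => p) false).map PySem.Int.toStr) with hkey
  set pairs : List (String × String) := m.map (fun x => (key x, x.1)) with hpairs
  -- A's fold over the map is the pairwise grouping fold over `pairs`
  have hfold : m.foldl
      (fun (groups : PySem.Dict String (List String)) x =>
        groups.modify (key x) [] (fun names => names ++ [x.1]))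
      PySem.Dict.empty
      = pairs.foldl (fun d p => d.modify p.1 [] (fun names => names ++ [p.2])) PySem.Dict.empty := by
    rw [hpairs, List.foldl_map]
  show (m.foldl (fun (groups : PySem.Dict String (List String)) x =>
        groups.modify (key x) [] (fun names => names ++ [x.1])) PySem.Dict.empty).items = _
  rw [hfold]
  set d := pairs.foldl (fun d p => d.modify p.1 [] (fun names => names ++ [p.2])) PySem.Dict.empty with hd
  have hkeys : d.keys = PySem.List.dedup (pairs.map Prod.fst) := by
    rw [hd, PySem.Dict.keys_foldl_modify_key pairs Prod.fst [] (fun _ p => fun names => names ++ [p.2])]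
    simp [PySem.List.dedup_eq_ofList, PySem.Set.update_nil_left]
  have hnodup : d.keys.Nodup := by
    rw [hd]
    exact PySem.Dict.nodup_keys_foldl_modify_key pairs Prod.fst []
      (fun _ p => fun names => names ++ [p.2]) PySem.Dict.empty (by simp)
  rw [pv_items_eq_keys_map d hnodup [], hkeys]
  refine List.map_congr_left ?_
  intro k _
  have := PySem.Dict.getD_foldl_modify_append pairs PySem.Dict.empty k
  simp only [← hd] at this
  simp [this]

-- ===== VERDICT (by name: the statement is the Claim_ definition above) =====
theorem group_drugs_by_pages_spec : Claim_equal_group_drugs_by_pages := by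
  intro m _
  unfold Spec_group_drugs_by_pages
  exact group_drugs_by_pages_eq_alt m
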